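-- pv_equiv track=rewrite | github.com/jingyuan4ever/checkio | stair-steps.py | dp
-- ===== SOURCE A (Python) =====
-- def dp(numbers, x, b):
--     if x == -1:
--         return 0
--     if x == 0:
--         if b:
--             return numbers[0]
--         return 0
--     if b:
--         return max(dp(numbers, x - 1, True), dp(numbers, x - 1, False)) + numbers[x]
--     return dp(numbers, x - 1, True)
-- ===== SOURCE B (Python) =====
-- def dp(numbers, x, b):
--     if not b:
--         x -= 1          # the False state at x is the True state at x - 1
--     if x <= -1:
--         return 0
--     t, f = numbers[0], 0    # take/skip state pair
--     for i in range(1, x + 1):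
--         t, f = max(t, f) + numbers[i], t
--     return t
-- ===== Notes on version B (the rewrite author's own statement) =====
-- stated objective: alternative
-- what changed: replaced the branching recursion over (x, True/False) by a single left-to-right pass keeping the pair (best taking the current step, best skipping it)
import Mathlib
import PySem

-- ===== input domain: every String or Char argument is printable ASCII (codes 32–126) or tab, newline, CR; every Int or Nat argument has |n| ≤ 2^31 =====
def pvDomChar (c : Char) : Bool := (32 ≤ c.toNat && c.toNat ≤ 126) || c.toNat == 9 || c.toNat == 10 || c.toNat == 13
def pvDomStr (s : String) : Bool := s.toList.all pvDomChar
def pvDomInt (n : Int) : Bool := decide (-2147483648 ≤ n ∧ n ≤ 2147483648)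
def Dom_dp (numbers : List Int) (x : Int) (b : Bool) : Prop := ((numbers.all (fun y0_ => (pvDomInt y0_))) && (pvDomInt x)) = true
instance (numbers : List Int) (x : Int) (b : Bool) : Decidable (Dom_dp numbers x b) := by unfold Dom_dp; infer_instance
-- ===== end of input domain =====

-- B replaces A's branching recursion by one linear pass over the indices
-- keeping the pair (best taking step i, best skipping step i).


-- ===== PORT A =====
-- A's recursion, fuel = x + 1 (the Int x is -1, 0, … under Pre_; below -1 Python diverges).
def dpAux (numbers : List Int) : Nat → Bool → Int
  | 0, _ => 0
  | 1, b => if b then PySem.List.pyGetD numbers 0 0 else 0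
  | (n + 2), b =>
    if b then
      max (dpAux numbers (n + 1) true) (dpAux numbers (n + 1) false)
        + PySem.List.pyGetD numbers ((n : Int) + 1) 0
    else dpAux numbers (n + 1) true

def dp (numbers : List Int) (x : Int) (b : Bool) : Int :=
  if x < -1 then 0 else dpAux numbers (x + 1).toNat b

-- ===== PORT B =====
def dp_alt (numbers : List Int) (x : Int) (b : Bool) : Int :=
  let x' := if b then x else x - 1
  if x' ≤ -1 then 0
  else
    ((PySem.List.pyRange 1 (x' + 1) 1).foldl
      (fun (p : Int × Int) i => (max p.1 p.2 + PySem.List.pyGetD numbers i 0, p.1))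
      (PySem.List.pyGetD numbers 0 0, 0)).1

-- ===== PRECONDITION & SPEC =====
-- Pre_ is exactly where Python A returns: x ≥ -1 (below -1 the recursion never terminates),
-- and the largest index A reads (x if b else x-1) is in range (else IndexError).
def Pre_dp (numbers : List Int) (x : Int) (b : Bool) : Prop :=
  -1 ≤ x ∧ (if b then x else x - 1) < (numbers.length : Int)
instance (numbers : List Int) (x : Int) (b : Bool) : Decidable (Pre_dp numbers x b) := by
  unfold Pre_dp; infer_instance

def pvWitness_dp : List Int × Int × Bool := ([5, -2, 3], 2, true)

def Spec_dp (numbers : List Int) (x : Int) (b : Bool) (out : Int) : Prop := out = dp_alt numbers x b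
instance (numbers : List Int) (x : Int) (b : Bool) (out : Int) : Decidable (Spec_dp numbers x b out) := by unfold Spec_dp; infer_instance

-- ===== CLAIM (what is proved, stated in full; the proofs are below) =====
def Claim_equal_dp : Prop := ∀ (numbers : List Int) (x : Int) (b : Bool), Dom_dp numbers x b → Pre_dp numbers x b → Spec_dp numbers x b (dp numbers x b)

-- ===== LEMMAS AND PROOFS =====

-- The pair maintained by B's loop after processing indices 1..n is exactly
-- (A's value at x = n with b = True, A's value at x = n with b = False).
lemma fold_pair (numbers : List Int) (n : Nat) :
    (PySem.List.pyRange 1 ((n : Int) + 1) 1).foldl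
      (fun (p : Int × Int) i => (max p.1 p.2 + PySem.List.pyGetD numbers i 0, p.1))
      (PySem.List.pyGetD numbers 0 0, 0)
    = (dpAux numbers (n + 1) true, dpAux numbers (n + 1) false) := by
  induction n with
  | zero =>
    rw [PySem.List.pyRange_one_eq_nil (by omega)]
    simp [dpAux]
  | succ n ih =>
    have hcast : ((n + 1 : Nat) : Int) + 1 = ((n : Int) + 1) + 1 := by push_cast; ring
    rw [hcast, PySem.List.pyRange_one_succ_right (by omega), List.foldl_append, ih]
    simp only [List.foldl_cons, List.foldl_nil]
    show _ = (dpAux numbers (n + 2) true, dpAux numbers (n + 2) false)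
    simp [dpAux]

theorem dp_spec : Claim_equal_dp := by
  intro numbers x b _ hPre
  unfold Pre_dp at hPre
  unfold Spec_dp
  cases b with
  | true =>
    by_cases hneg : x = -1
    · subst hneg; simp [dp, dp_alt]
      rfl
    · have hx0 : 0 ≤ x := by omega
      lift x to ℕ using hx0 with n
      have h1 : ¬ ((n : Int) < -1) := by omega
      have h2 : ((n : Int) + 1).toNat = n + 1 := by omega
      have h3 : ¬ ((n : Int) ≤ -1) := by omega
      simp only [dp, if_neg h1, h2, dp_alt, if_true, if_neg h3, fold_pair]
  | false =>
    by_cases hsm : x ≤ 0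
    · -- x = -1 or x = 0: both sides are 0
      have hx : x = -1 ∨ x = 0 := by omega
      rcases hx with rfl | rfl
      · simp [dp, dp_alt]; rfl
      · norm_num [dp, dp_alt]
        show dpAux numbers (0 + 1 : Int).toNat false = 0
        norm_num [dpAux]
    · have hx1 : 1 ≤ x := by omega
      lift x to ℕ using (by omega : (0:Int) ≤ x) with n
      have hn1 : 1 ≤ n := by exact_mod_cast hx1
      obtain ⟨m, rfl⟩ : ∃ m, n = m + 1 := ⟨n - 1, by omega⟩
      have h1 : ¬ (((m + 1 : Nat) : Int) < -1) := by omega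
      have h2 : (((m + 1 : Nat) : Int) + 1).toNat = m + 2 := by omega
      have h3 : ¬ (((m + 1 : Nat) : Int) - 1 ≤ -1) := by omega
      have h4 : ((m + 1 : Nat) : Int) - 1 + 1 = (m : Int) + 1 := by push_cast; ring
      simp only [dp, if_neg h1, h2, dp_alt, Bool.false_eq_true, if_false, if_neg h3, h4,
        fold_pair]
      simp [dpAux]
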